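-- pv_equiv track=rewrite | github.com/mattschu22/KernelPatchAgent | kernel_patcher/analysis.py | analyze_by_subsystem
-- ===== SOURCE A (Python) =====
-- def analyze_by_subsystem(
--     results: dict[str, list[int]],
--     patch_types: list[list[str]],
-- ) -> dict[str, dict[str, int]]:
--     """Break down results by kernel subsystem.
--
--     Returns:
--         {subsystem: {correct: N, incorrect: N, not_applied: N, total: N}}
--     """
--     subsystems: dict[str, dict[str, int]] = {}
--
--     # Build index -> subsystem mapping
--     idx_to_subsystem: dict[int, str] = {}
--     for idx, entry in enumerate(patch_types):
--         subsystem = entry[-1] if entry else "Unknown"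
--         idx_to_subsystem[idx] = subsystem
--
--     # Count by status
--     status_map = {"c": "correct", "i": "incorrect", "na": "not_applied"}
--     for status_key, label in status_map.items():
--         for idx in results.get(status_key, []):
--             subsystem = idx_to_subsystem.get(idx, "Unknown")
--             if subsystem not in subsystems:
--                 subsystems[subsystem] = {"correct": 0, "incorrect": 0, "not_applied": 0, "total": 0}
--             subsystems[subsystem][label] += 1
--             subsystems[subsystem]["total"] += 1
--
--     return dict(sorted(subsystems.items()))
-- ===== SOURCE B (Python) =====
-- def analyze_by_subsystem(
--     results: dict[str, list[int]],
--     patch_types: list[list[str]],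
-- ) -> dict[str, dict[str, int]]:
--     """Break down results by kernel subsystem.
--
--     Single pass per status bucket into independent per-label tallies (no
--     index->subsystem table, no incrementally-updated nested dict); the sorted
--     result table is assembled at the end from the three tallies.
--     """
--     n = len(patch_types)
--
--     def subsystem_of(idx):
--         if 0 <= idx < n and patch_types[idx]:
--             return patch_types[idx][-1]
--         return "Unknown"
--
--     def tally(indices):
--         counts = {}
--         for idx in indices:
--             s = subsystem_of(idx)
--             counts[s] = counts.get(s, 0) + 1
--         return counts
--
--     correct = tally(results.get("c", []))
--     incorrect = tally(results.get("i", []))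
--     not_applied = tally(results.get("na", []))
--
--     names = sorted(set(correct) | set(incorrect) | set(not_applied))
--     return {
--         s: {
--             "correct": correct.get(s, 0),
--             "incorrect": incorrect.get(s, 0),
--             "not_applied": not_applied.get(s, 0),
--             "total": correct.get(s, 0) + incorrect.get(s, 0) + not_applied.get(s, 0),
--         }
--         for s in names
--     }
-- ===== Notes on version B (the rewrite author's own statement) =====
-- stated objective: alternative
-- what changed: Replaces the precomputed index->subsystem table and the incrementally-updated nested four-counter dict with a guarded inline subsystem lookup feeding three independent per-label tallies, from which the sorted result table is assembled in one final comprehension.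
import Mathlib
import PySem

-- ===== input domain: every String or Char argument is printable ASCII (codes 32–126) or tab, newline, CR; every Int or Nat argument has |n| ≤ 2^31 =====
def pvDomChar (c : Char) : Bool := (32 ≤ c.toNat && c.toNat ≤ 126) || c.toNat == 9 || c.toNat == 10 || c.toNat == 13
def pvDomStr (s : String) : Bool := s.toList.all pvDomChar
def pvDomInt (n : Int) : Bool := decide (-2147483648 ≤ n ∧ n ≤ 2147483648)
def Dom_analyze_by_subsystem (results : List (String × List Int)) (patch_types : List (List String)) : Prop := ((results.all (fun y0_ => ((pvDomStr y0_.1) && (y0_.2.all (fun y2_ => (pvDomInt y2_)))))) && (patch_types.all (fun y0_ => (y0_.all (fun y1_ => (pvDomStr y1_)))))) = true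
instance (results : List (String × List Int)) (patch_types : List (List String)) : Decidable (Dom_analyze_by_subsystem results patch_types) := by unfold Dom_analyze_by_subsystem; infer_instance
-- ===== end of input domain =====

-- B replaces A's precomputed index->subsystem table and incrementally-updated nested counter dict
-- with a guarded inline lookup feeding three independent per-label tallies assembled at the end
-- (objective: alternative decomposition, same exact result).

-- ===== PORT A =====
-- helper naming A's inline expression `entry[-1] if entry else "Unknown"`
def pvEntrySub (entry : List String) : String :=
  if entry ≠ [] then (PySem.List.pyGet? entry (-1)).getD "Unknown" else "Unknown"

-- helper naming the body of A's inner counting loop (subFor = the idx_to_subsystem lookup)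
def pvStatusStep (subFor : Int → String) (label : String)
    (subs : PySem.Dict String (PySem.Dict String Int)) (idx : Int) :
    PySem.Dict String (PySem.Dict String Int) :=
  let subsystem := subFor idx
  let subs := if subs.contains subsystem then subs
    else subs.insert subsystem
      (PySem.Dict.mk [("correct", (0 : Int)), ("incorrect", 0), ("not_applied", 0), ("total", 0)])
  let inner := subs.getD subsystem (PySem.Dict.mk [])
  let inner := inner.insert label (inner.getD label 0 + 1)
  let inner := inner.insert "total" (inner.getD "total" 0 + 1)
  subs.insert subsystem inner

def analyze_by_subsystem (results : List (String × List Int)) (patch_types : List (List String)) :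
    List (String × List (String × Int)) :=
  let idx_to_subsystem : PySem.Dict Int String :=
    (PySem.List.enumerate patch_types).foldl
      (fun d p => d.insert p.1 (pvEntrySub p.2)) PySem.Dict.empty
  let status_map : List (String × String) := [("c", "correct"), ("i", "incorrect"), ("na", "not_applied")]
  let subsystems : PySem.Dict String (PySem.Dict String Int) :=
    status_map.foldl
      (fun subs sl =>
        (PySem.Dict.getD (PySem.Dict.mk results) sl.1 []).foldl
          (pvStatusStep (fun idx => idx_to_subsystem.getD idx "Unknown") sl.2) subs)
      PySem.Dict.empty
  -- dict(sorted(subsystems.items())): the keys are distinct, so Python's tuple sort is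
  -- exactly the stable sort by the first component
  (PySem.List.sorted subsystems.items (fun p => p.1)).map (fun p => (p.1, p.2.items))

-- ===== PORT B =====
-- Source B's `subsystem_of`
def pvSubsystemOf (patch_types : List (List String)) (idx : Int) : String :=
  if 0 ≤ idx ∧ idx < (patch_types.length : Int) ∧ PySem.List.pyGetD patch_types idx [] ≠ [] then
    -- entry[-1] of a nonempty list is its last element (exact)
    ((PySem.List.pyGetD patch_types idx []).getLast?).getD "Unknown"
  else "Unknown"

-- Source B's `tally`
def pvTally (patch_types : List (List String)) (indices : List Int) : PySem.Dict String Int :=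
  indices.foldl
    (fun counts idx =>
      let s := pvSubsystemOf patch_types idx
      counts.insert s (counts.getD s 0 + 1))
    PySem.Dict.empty

def analyze_by_subsystem_alt (results : List (String × List Int)) (patch_types : List (List String)) :
    List (String × List (String × Int)) :=
  let d := PySem.Dict.mk results
  let correct := pvTally patch_types (d.getD "c" [])
  let incorrect := pvTally patch_types (d.getD "i" [])
  let notApplied := pvTally patch_types (d.getD "na" [])
  let names := PySem.List.sorted
    (PySem.Set.union (PySem.Set.union (PySem.Set.ofList correct.keys) incorrect.keys) notApplied.keys)
    (fun s => s)
  names.map (fun s =>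
    (s, [("correct", correct.getD s 0), ("incorrect", incorrect.getD s 0),
         ("not_applied", notApplied.getD s 0),
         ("total", correct.getD s 0 + incorrect.getD s 0 + notApplied.getD s 0)]))

-- ===== PRECONDITION & SPEC =====
def Spec_analyze_by_subsystem (results : List (String × List Int)) (patch_types : List (List String)) (out : List (String × List (String × Int))) : Prop := out = analyze_by_subsystem_alt results patch_types
instance (results : List (String × List Int)) (patch_types : List (List String)) (out : List (String × List (String × Int))) : Decidable (Spec_analyze_by_subsystem results patch_types out) := by unfold Spec_analyze_by_subsystem; infer_instance

-- ===== CLAIM (what is proved, stated in full; the proofs are below) =====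
def Claim_equal_analyze_by_subsystem : Prop := ∀ (results : List (String × List Int)) (patch_types : List (List String)), Dom_analyze_by_subsystem results patch_types → Spec_analyze_by_subsystem results patch_types (analyze_by_subsystem results patch_types)

-- ===== LEMMAS AND PROOFS =====

-- the common canonical form both ports are reduced to
def pvCanon (results : List (String × List Int)) (patch_types : List (List String)) :
    List (String × List (String × Int)) :=
  let sub := pvSubsystemOf patch_types
  let Mc := (PySem.Dict.getD (PySem.Dict.mk results) "c" []).map sub
  let Mi := (PySem.Dict.getD (PySem.Dict.mk results) "i" []).map sub
  let Mn := (PySem.Dict.getD (PySem.Dict.mk results) "na" []).map sub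
  (PySem.List.sorted (PySem.Set.ofList (Mc ++ Mi ++ Mn)) (fun s => s)).map
    (fun s =>
      (s, [("correct", (Mc.count s : Int)), ("incorrect", (Mi.count s : Int)),
           ("not_applied", (Mn.count s : Int)),
           ("total", (Mc.count s : Int) + (Mi.count s : Int) + (Mn.count s : Int))]))

def inner4 (a b c : Int) : PySem.Dict String Int :=
  PySem.Dict.mk [("correct", a), ("incorrect", b), ("not_applied", c), ("total", a + b + c)]

theorem pvGetNegOne (e : List String) : PySem.List.pyGet? e (-1) = e.getLast? := by
  cases e with
  | nil => rfl
  | cons x xs => simp [PySem.List.pyGet?, PySem.List.pyIdx?, List.getLast?_eq_getElem?]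

theorem pv_i2s_getD (pts : List (List String)) :
    ∀ (k : Int) (d : PySem.Dict Int String) (idx : Int),
      ((PySem.List.enumerate pts k).foldl (fun d p => d.insert p.1 (pvEntrySub p.2)) d).getD idx "Unknown"
        = if k ≤ idx ∧ idx < k + pts.length then pvEntrySub (pts.getD (idx - k).toNat [])
          else d.getD idx "Unknown" := by
  induction pts with
  | nil =>
    intro k d idx
    simp [PySem.List.enumerate]
  | cons e es IH =>
    intro k d idx
    rw [show PySem.List.enumerate (e :: es) k = (k, e) :: PySem.List.enumerate es (k + 1) from by
      simp [PySem.List.enumerate]]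
    rw [List.foldl_cons, IH (k + 1)]
    by_cases h : idx = k
    · subst h
      rw [if_neg (by rintro ⟨h1, -⟩; omega),
        if_pos (by refine ⟨le_refl _, ?_⟩; rw [List.length_cons]; push_cast; omega)]
      rw [PySem.Dict.getD_insert_self]
      simp
    · by_cases h2 : k + 1 ≤ idx ∧ idx < (k + 1) + (es.length : Int)
      · rw [if_pos h2, if_pos (by simp; omega)]
        have hm : (idx - k).toNat = (idx - (k + 1)).toNat + 1 := by omega
        rw [hm, List.getD_cons_succ]
      · rw [if_neg h2, if_neg (by simp; omega)]
        exact PySem.Dict.getD_insert_of_ne d (pvEntrySub e) "Unknown" h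

theorem pvSubFor_eq (pts : List (List String)) (idx : Int) :
    ((PySem.List.enumerate pts).foldl (fun d p => d.insert p.1 (pvEntrySub p.2))
        PySem.Dict.empty).getD idx "Unknown" = pvSubsystemOf pts idx := by
  rw [pv_i2s_getD pts 0]
  unfold pvSubsystemOf
  by_cases h : 0 ≤ idx ∧ idx < (pts.length : Int)
  · rw [if_pos (by omega)]
    rw [PySem.List.pyGetD_of_nonneg pts [] h.1]
    have : (idx - 0).toNat = idx.toNat := by omega
    rw [this]
    unfold pvEntrySub
    rw [pvGetNegOne]
    by_cases he : pts.getD idx.toNat [] = []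
    · rw [if_neg (by simp only [ne_eq, not_not]; exact he),
        if_neg (by rintro ⟨_, _, hne⟩; exact hne he)]
    · rw [if_pos he, if_pos ⟨h.1, h.2, he⟩]
  · rw [if_neg (by omega), if_neg (by tauto), PySem.Dict.getD_empty]

-- invariant for A's counting loop
def InvA (subs : PySem.Dict String (PySem.Dict String Int)) (a b c : String → Int)
    (dom : List String) : Prop :=
  subs.keys.Nodup ∧
  (∀ s, subs.contains s = true ↔ s ∈ dom) ∧
  (∀ s ∈ dom, subs.getD s (PySem.Dict.mk []) = inner4 (a s) (b s) (c s)) ∧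
  (∀ s, s ∉ dom → a s = 0 ∧ b s = 0 ∧ c s = 0)

theorem InvA_congr {subs : PySem.Dict String (PySem.Dict String Int)}
    {a b c a' b' c' : String → Int} {dom dom' : List String}
    (h : InvA subs a b c dom) (ha : ∀ s, a' s = a s) (hb : ∀ s, b' s = b s)
    (hc : ∀ s, c' s = c s) (hdom : ∀ s, s ∈ dom' ↔ s ∈ dom) :
    InvA subs a' b' c' dom' := by
  obtain ⟨h1, h2, h3, h4⟩ := h
  refine ⟨h1, fun s => (h2 s).trans (hdom s).symm, ?_, ?_⟩
  · intro s hs; rw [ha, hb, hc]; exact h3 s ((hdom s).mp hs)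
  · intro s hs; rw [ha, hb, hc]; exact h4 s (fun m => hs ((hdom s).mpr m))

theorem pvD0_eq :
    PySem.Dict.mk [("correct", (0 : Int)), ("incorrect", 0), ("not_applied", 0), ("total", 0)]
      = inner4 0 0 0 := by
  unfold inner4; norm_num

theorem pvBump_correct (a b c : Int) :
    ((inner4 a b c).insert "correct" ((inner4 a b c).getD "correct" 0 + 1)).insert "total"
        (((inner4 a b c).insert "correct" ((inner4 a b c).getD "correct" 0 + 1)).getD "total" 0 + 1)
      = inner4 (a + 1) b c := by
  simp [inner4, PySem.Dict.insert, PySem.Dict.getD, PySem.Dict.get?, PySem.Dict.contains]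
  ring

theorem pvBump_incorrect (a b c : Int) :
    ((inner4 a b c).insert "incorrect" ((inner4 a b c).getD "incorrect" 0 + 1)).insert "total"
        (((inner4 a b c).insert "incorrect" ((inner4 a b c).getD "incorrect" 0 + 1)).getD "total" 0 + 1)
      = inner4 a (b + 1) c := by
  simp [inner4, PySem.Dict.insert, PySem.Dict.getD, PySem.Dict.get?, PySem.Dict.contains]
  ring

theorem pvBump_notapplied (a b c : Int) :
    ((inner4 a b c).insert "not_applied" ((inner4 a b c).getD "not_applied" 0 + 1)).insert "total"
        (((inner4 a b c).insert "not_applied" ((inner4 a b c).getD "not_applied" 0 + 1)).getD "total" 0 + 1)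
      = inner4 a b (c + 1) := by
  simp [inner4, PySem.Dict.insert, PySem.Dict.getD, PySem.Dict.get?, PySem.Dict.contains]
  ring

theorem pvStep_correct (f : Int → String) {subs : PySem.Dict String (PySem.Dict String Int)}
    {a b c : String → Int} {dom : List String} (h : InvA subs a b c dom) (i : Int) :
    InvA (pvStatusStep f "correct" subs i)
      (fun s => if s = f i then a s + 1 else a s) b c (dom ++ [f i]) := by
  obtain ⟨hnd, hcont, hget, hzero⟩ := h
  simp only [pvStatusStep]
  by_cases hc : subs.contains (f i) = true
  · have hmem : f i ∈ dom := (hcont _).mp hc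
    rw [if_pos hc, hget _ hmem, pvBump_correct]
    refine ⟨PySem.Dict.nodup_keys_insert _ _ _ hnd, ?_, ?_, ?_⟩
    · intro s
      rw [PySem.Dict.contains_insert]
      simp only [Bool.or_eq_true, beq_iff_eq, hcont s, List.mem_append, List.mem_singleton]
      tauto
    · intro s hs
      rw [PySem.Dict.getD_insert]
      split_ifs with he
      · rw [he]; simp
      · have hd : s ∈ dom := by
          rcases List.mem_append.mp hs with hm | hm
          · exact hm
          · exact absurd (List.mem_singleton.mp hm) he
        rw [hget s hd]; simp [he]
    · intro s hs
      have h1 : s ∉ dom := fun m => hs (List.mem_append.mpr (Or.inl m))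
      have h2 : s ≠ f i := fun e => hs (List.mem_append.mpr (Or.inr (by simp [e])))
      simpa [h2] using hzero s h1
  · have hnm : f i ∉ dom := fun m => hc ((hcont _).mpr m)
    obtain ⟨ha0, hb0, hc0⟩ := hzero _ hnm
    rw [if_neg hc, PySem.Dict.getD_insert_self, pvD0_eq, pvBump_correct,
      PySem.Dict.insert_insert_self]
    refine ⟨PySem.Dict.nodup_keys_insert _ _ _ hnd, ?_, ?_, ?_⟩
    · intro s
      rw [PySem.Dict.contains_insert]
      simp only [Bool.or_eq_true, beq_iff_eq, hcont s, List.mem_append, List.mem_singleton]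
      tauto
    · intro s hs
      rw [PySem.Dict.getD_insert]
      split_ifs with he
      · rw [he]; simp [ha0, hb0, hc0]
      · have hd : s ∈ dom := by
          rcases List.mem_append.mp hs with hm | hm
          · exact hm
          · exact absurd (List.mem_singleton.mp hm) he
        rw [hget s hd]; simp [he]
    · intro s hs
      have h1 : s ∉ dom := fun m => hs (List.mem_append.mpr (Or.inl m))
      have h2 : s ≠ f i := fun e => hs (List.mem_append.mpr (Or.inr (by simp [e])))
      simpa [h2] using hzero s h1

theorem pvStep_incorrect (f : Int → String) {subs : PySem.Dict String (PySem.Dict String Int)}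
    {a b c : String → Int} {dom : List String} (h : InvA subs a b c dom) (i : Int) :
    InvA (pvStatusStep f "incorrect" subs i)
      a (fun s => if s = f i then b s + 1 else b s) c (dom ++ [f i]) := by
  obtain ⟨hnd, hcont, hget, hzero⟩ := h
  simp only [pvStatusStep]
  by_cases hc : subs.contains (f i) = true
  · have hmem : f i ∈ dom := (hcont _).mp hc
    rw [if_pos hc, hget _ hmem, pvBump_incorrect]
    refine ⟨PySem.Dict.nodup_keys_insert _ _ _ hnd, ?_, ?_, ?_⟩
    · intro s
      rw [PySem.Dict.contains_insert]
      simp only [Bool.or_eq_true, beq_iff_eq, hcont s, List.mem_append, List.mem_singleton]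
      tauto
    · intro s hs
      rw [PySem.Dict.getD_insert]
      split_ifs with he
      · rw [he]; simp
      · have hd : s ∈ dom := by
          rcases List.mem_append.mp hs with hm | hm
          · exact hm
          · exact absurd (List.mem_singleton.mp hm) he
        rw [hget s hd]; simp [he]
    · intro s hs
      have h1 : s ∉ dom := fun m => hs (List.mem_append.mpr (Or.inl m))
      have h2 : s ≠ f i := fun e => hs (List.mem_append.mpr (Or.inr (by simp [e])))
      simpa [h2] using hzero s h1
  · have hnm : f i ∉ dom := fun m => hc ((hcont _).mpr m)
    obtain ⟨ha0, hb0, hc0⟩ := hzero _ hnm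
    rw [if_neg hc, PySem.Dict.getD_insert_self, pvD0_eq, pvBump_incorrect,
      PySem.Dict.insert_insert_self]
    refine ⟨PySem.Dict.nodup_keys_insert _ _ _ hnd, ?_, ?_, ?_⟩
    · intro s
      rw [PySem.Dict.contains_insert]
      simp only [Bool.or_eq_true, beq_iff_eq, hcont s, List.mem_append, List.mem_singleton]
      tauto
    · intro s hs
      rw [PySem.Dict.getD_insert]
      split_ifs with he
      · rw [he]; simp [ha0, hb0, hc0]
      · have hd : s ∈ dom := by
          rcases List.mem_append.mp hs with hm | hm
          · exact hm
          · exact absurd (List.mem_singleton.mp hm) he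
        rw [hget s hd]; simp [he]
    · intro s hs
      have h1 : s ∉ dom := fun m => hs (List.mem_append.mpr (Or.inl m))
      have h2 : s ≠ f i := fun e => hs (List.mem_append.mpr (Or.inr (by simp [e])))
      simpa [h2] using hzero s h1

theorem pvStep_notapplied (f : Int → String) {subs : PySem.Dict String (PySem.Dict String Int)}
    {a b c : String → Int} {dom : List String} (h : InvA subs a b c dom) (i : Int) :
    InvA (pvStatusStep f "not_applied" subs i)
      a b (fun s => if s = f i then c s + 1 else c s) (dom ++ [f i]) := by
  obtain ⟨hnd, hcont, hget, hzero⟩ := h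
  simp only [pvStatusStep]
  by_cases hc : subs.contains (f i) = true
  · have hmem : f i ∈ dom := (hcont _).mp hc
    rw [if_pos hc, hget _ hmem, pvBump_notapplied]
    refine ⟨PySem.Dict.nodup_keys_insert _ _ _ hnd, ?_, ?_, ?_⟩
    · intro s
      rw [PySem.Dict.contains_insert]
      simp only [Bool.or_eq_true, beq_iff_eq, hcont s, List.mem_append, List.mem_singleton]
      tauto
    · intro s hs
      rw [PySem.Dict.getD_insert]
      split_ifs with he
      · rw [he]; simp
      · have hd : s ∈ dom := by
          rcases List.mem_append.mp hs with hm | hm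
          · exact hm
          · exact absurd (List.mem_singleton.mp hm) he
        rw [hget s hd]; simp [he]
    · intro s hs
      have h1 : s ∉ dom := fun m => hs (List.mem_append.mpr (Or.inl m))
      have h2 : s ≠ f i := fun e => hs (List.mem_append.mpr (Or.inr (by simp [e])))
      simpa [h2] using hzero s h1
  · have hnm : f i ∉ dom := fun m => hc ((hcont _).mpr m)
    obtain ⟨ha0, hb0, hc0⟩ := hzero _ hnm
    rw [if_neg hc, PySem.Dict.getD_insert_self, pvD0_eq, pvBump_notapplied,
      PySem.Dict.insert_insert_self]
    refine ⟨PySem.Dict.nodup_keys_insert _ _ _ hnd, ?_, ?_, ?_⟩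
    · intro s
      rw [PySem.Dict.contains_insert]
      simp only [Bool.or_eq_true, beq_iff_eq, hcont s, List.mem_append, List.mem_singleton]
      tauto
    · intro s hs
      rw [PySem.Dict.getD_insert]
      split_ifs with he
      · rw [he]; simp [ha0, hb0, hc0]
      · have hd : s ∈ dom := by
          rcases List.mem_append.mp hs with hm | hm
          · exact hm
          · exact absurd (List.mem_singleton.mp hm) he
        rw [hget s hd]; simp [he]
    · intro s hs
      have h1 : s ∉ dom := fun m => hs (List.mem_append.mpr (Or.inl m))
      have h2 : s ≠ f i := fun e => hs (List.mem_append.mpr (Or.inr (by simp [e])))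
      simpa [h2] using hzero s h1

theorem pvFold_correct (f : Int → String) (l : List Int) :
    ∀ {subs : PySem.Dict String (PySem.Dict String Int)} {a b c : String → Int} {dom : List String},
      InvA subs a b c dom →
      InvA (l.foldl (pvStatusStep f "correct") subs)
        (fun s => a s + ((l.map f).count s : Int)) b c (dom ++ l.map f) := by
  induction l with
  | nil =>
    intro subs a b c dom h
    exact InvA_congr h (fun s => by simp) (fun _ => rfl) (fun _ => rfl) (fun s => by simp)
  | cons i t IH =>
    intro subs a b c dom h
    have h2 := IH (pvStep_correct f h i)
    refine InvA_congr h2 ?_ (fun _ => rfl) (fun _ => rfl) ?_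
    · intro s
      by_cases e : s = f i
      · subst e; simp; ring
      · have e' : (f i == s) = false := by rw [beq_eq_false_iff_ne]; exact Ne.symm e
        simp [List.count_cons, e, e']
    · intro s; simp [List.mem_append, List.mem_cons]

theorem pvFold_incorrect (f : Int → String) (l : List Int) :
    ∀ {subs : PySem.Dict String (PySem.Dict String Int)} {a b c : String → Int} {dom : List String},
      InvA subs a b c dom →
      InvA (l.foldl (pvStatusStep f "incorrect") subs)
        a (fun s => b s + ((l.map f).count s : Int)) c (dom ++ l.map f) := by
  induction l with
  | nil =>
    intro subs a b c dom h
    exact InvA_congr h (fun _ => rfl) (fun s => by simp) (fun _ => rfl) (fun s => by simp)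
  | cons i t IH =>
    intro subs a b c dom h
    have h2 := IH (pvStep_incorrect f h i)
    refine InvA_congr h2 (fun _ => rfl) ?_ (fun _ => rfl) ?_
    · intro s
      by_cases e : s = f i
      · subst e; simp; ring
      · have e' : (f i == s) = false := by rw [beq_eq_false_iff_ne]; exact Ne.symm e
        simp [List.count_cons, e, e']
    · intro s; simp [List.mem_append, List.mem_cons]

theorem pvFold_notapplied (f : Int → String) (l : List Int) :
    ∀ {subs : PySem.Dict String (PySem.Dict String Int)} {a b c : String → Int} {dom : List String},
      InvA subs a b c dom →
      InvA (l.foldl (pvStatusStep f "not_applied") subs)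
        a b (fun s => c s + ((l.map f).count s : Int)) (dom ++ l.map f) := by
  induction l with
  | nil =>
    intro subs a b c dom h
    exact InvA_congr h (fun _ => rfl) (fun _ => rfl) (fun s => by simp) (fun s => by simp)
  | cons i t IH =>
    intro subs a b c dom h
    have h2 := IH (pvStep_notapplied f h i)
    refine InvA_congr h2 (fun _ => rfl) (fun _ => rfl) ?_ ?_
    · intro s
      by_cases e : s = f i
      · subst e; simp; ring
      · have e' : (f i == s) = false := by rw [beq_eq_false_iff_ne]; exact Ne.symm e
        simp [List.count_cons, e, e']
    · intro s; simp [List.mem_append, List.mem_cons]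

theorem pvA_canon (results : List (String × List Int)) (patch_types : List (List String)) :
    analyze_by_subsystem results patch_types = pvCanon results patch_types := by
  have hfun : (fun idx =>
      ((PySem.List.enumerate patch_types).foldl (fun d p => d.insert p.1 (pvEntrySub p.2))
        PySem.Dict.empty).getD idx "Unknown") = pvSubsystemOf patch_types :=
    funext (pvSubFor_eq patch_types)
  simp only [analyze_by_subsystem, pvCanon, List.foldl_cons, List.foldl_nil, hfun]
  set sub := pvSubsystemOf patch_types
  set Lc := PySem.Dict.getD (PySem.Dict.mk results) "c" [] with hLc
  set Li := PySem.Dict.getD (PySem.Dict.mk results) "i" [] with hLi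
  set Ln := PySem.Dict.getD (PySem.Dict.mk results) "na" [] with hLn
  have h0 : InvA PySem.Dict.empty (fun _ => 0) (fun _ => 0) (fun _ => 0) [] :=
    ⟨PySem.Dict.nodup_keys_empty, by simp [PySem.Dict.contains_empty], by simp, by simp⟩
  have h3 := pvFold_notapplied sub Ln (pvFold_incorrect sub Li (pvFold_correct sub Lc h0))
  have hI : InvA
      (Ln.foldl (pvStatusStep sub "not_applied")
        (Li.foldl (pvStatusStep sub "incorrect")
          (Lc.foldl (pvStatusStep sub "correct") PySem.Dict.empty)))
      (fun s => ((Lc.map sub).count s : Int)) (fun s => ((Li.map sub).count s : Int))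
      (fun s => ((Ln.map sub).count s : Int))
      (Lc.map sub ++ Li.map sub ++ Ln.map sub) :=
    InvA_congr h3 (fun s => by simp) (fun s => by simp) (fun s => by simp)
      (fun s => by simp [List.mem_append])
  set S := Ln.foldl (pvStatusStep sub "not_applied")
      (Li.foldl (pvStatusStep sub "incorrect")
        (Lc.foldl (pvStatusStep sub "correct") PySem.Dict.empty))
  obtain ⟨hnd, hcont, hget, _⟩ := hI
  have hkeysmem : ∀ x, x ∈ S.keys ↔ x ∈ Lc.map sub ++ Li.map sub ++ Ln.map sub := fun x =>
    (PySem.Dict.contains_iff_mem_keys S x).symm.trans (hcont x)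
  have hsorted : PySem.List.sorted S.items (fun p => p.1)
      = (PySem.List.sorted (PySem.Set.ofList (Lc.map sub ++ Li.map sub ++ Ln.map sub)) (fun s => s)).map
          (fun k => (k, inner4 ((Lc.map sub).count k : Int) ((Li.map sub).count k : Int)
            ((Ln.map sub).count k : Int))) := by
    apply PySem.List.sorted_eq_of_perm_of_pairwise_lt
    · rw [PySem.Dict.items_eq_map_keys S hnd (PySem.Dict.mk []),
        List.map_congr_left (fun k hk => by
          rw [hget k ((hkeysmem k).mp hk)] :
          ∀ k ∈ S.keys, (k, S.getD k (PySem.Dict.mk []))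
            = (k, inner4 ((Lc.map sub).count k : Int) ((Li.map sub).count k : Int)
              ((Ln.map sub).count k : Int)))]
      apply List.Perm.map
      refine (PySem.List.sorted_perm _ _ _).trans ?_
      refine (List.perm_ext_iff_of_nodup (PySem.Set.nodup_ofList _) hnd).mpr (fun x => ?_)
      rw [PySem.Set.mem_ofList, hkeysmem]
    · exact List.Pairwise.map _ (fun x1 x2 h => h)
        (PySem.List.sorted_ofList_pairwise_lt (Lc.map sub ++ Li.map sub ++ Ln.map sub))
  rw [hsorted, List.map_map]
  rfl

theorem pvTally_eq (patch_types : List (List String)) (l : List Int) :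
    pvTally patch_types l = PySem.Dict.counter (l.map (pvSubsystemOf patch_types)) := by
  rw [← PySem.Dict.foldl_insert_getD_add_one_eq_counter, List.foldl_map]
  rfl

theorem pvB_canon (results : List (String × List Int)) (patch_types : List (List String)) :
    analyze_by_subsystem_alt results patch_types = pvCanon results patch_types := by
  simp only [analyze_by_subsystem_alt, pvCanon, pvTally_eq, PySem.Dict.keys_counter,
    PySem.Dict.getD_counter]
  set sub := pvSubsystemOf patch_types
  set Mc := (PySem.Dict.getD (PySem.Dict.mk results) "c" []).map sub
  set Mi := (PySem.Dict.getD (PySem.Dict.mk results) "i" []).map sub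
  set Mn := (PySem.Dict.getD (PySem.Dict.mk results) "na" []).map sub
  have hnames : PySem.List.sorted
      (PySem.Set.union (PySem.Set.union (PySem.Set.ofList (PySem.Set.ofList Mc))
        (PySem.Set.ofList Mi)) (PySem.Set.ofList Mn)) (fun s => s)
      = PySem.List.sorted (PySem.Set.ofList (Mc ++ Mi ++ Mn)) (fun s => s) := by
    apply PySem.List.sorted_eq_sorted_of_perm _ _ _ (fun x y h => h)
    refine (List.perm_ext_iff_of_nodup ?_ (PySem.Set.nodup_ofList _)).mpr (fun x => ?_)
    · exact PySem.Set.nodup_union _ _ (PySem.Set.nodup_union _ _ (PySem.Set.nodup_ofList _))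
    · simp only [PySem.Set.mem_union, PySem.Set.mem_ofList, List.mem_append]
  rw [hnames]

-- ===== VERDICT (by name: the statement is the Claim_ definition above) =====
theorem analyze_by_subsystem_spec : Claim_equal_analyze_by_subsystem := by
  intro results patch_types _
  unfold Spec_analyze_by_subsystem
  rw [pvA_canon, pvB_canon]
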